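-- pv_equiv track=rewrite | github.com/zzachw/MUSE | src/stat_check_adni.py | list_occurrence_counter
-- ===== SOURCE A (Python) =====
-- from collections import Counter
--
-- def list_occurrence_counter(lst):
--     counter = Counter(lst)
--     keys = sorted(counter.keys())
--     message = []
--     for k in keys:
--         count = counter[k]
--         percentage = count / len(lst)
--         message.append(f"{k}: {percentage:.2f}")
--     return "{" + ", ".join(message) + "}"
-- ===== SOURCE B (Python) =====
-- def list_occurrence_counter(lst):
--     n = len(lst)
--     s = sorted(lst)
--     parts = []
--     i = 0
--     while i < n:
--         j = i + 1
--         while j < n and s[j] == s[i]: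
--             j += 1
--         parts.append(f"{s[i]}: {(j - i) / n:.2f}")
--         i = j
--     return "{" + ", ".join(parts) + "}"
-- ===== Notes on version B (the rewrite author's own statement) =====
-- stated objective: alternative
-- what changed: Replaced the Counter hash map + sort of its keys by sorting the whole list once and emitting one entry per run of equal elements with a two-index run-length scan, so no dictionary is built at all.
import Mathlib
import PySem

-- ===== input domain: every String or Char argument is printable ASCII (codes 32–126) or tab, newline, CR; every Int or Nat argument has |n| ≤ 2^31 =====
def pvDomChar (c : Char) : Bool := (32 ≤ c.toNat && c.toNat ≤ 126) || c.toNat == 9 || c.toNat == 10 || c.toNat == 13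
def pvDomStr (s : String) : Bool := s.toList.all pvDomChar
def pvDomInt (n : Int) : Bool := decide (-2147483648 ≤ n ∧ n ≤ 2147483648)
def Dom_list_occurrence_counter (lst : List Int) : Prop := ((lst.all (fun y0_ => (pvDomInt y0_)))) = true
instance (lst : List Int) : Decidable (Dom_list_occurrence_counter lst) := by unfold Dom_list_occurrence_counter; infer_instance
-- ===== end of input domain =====

-- B replaces A's Counter + sorted(keys) by one sort of the whole list followed by a
-- run-length scan over consecutive equal elements (a different algorithm of similar cost).

-- ===== PORT A =====
-- A-side emulation of CPython's  f"{c/n:.2f}"  for integers 0 ≤ c ≤ n, n > 0 (the only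
-- arguments A ever passes): c/n is rounded to the nearest binary64 double (53-bit
-- significand, round-half-to-even; the quotient is in (0,1], so no overflow or
-- subnormals), and that double is rounded to 2 decimal places, ties to even. Exact there.

-- Round a/b (b > 0) to the nearest integer, ties to even.
def pvRHE (a b : Nat) : Nat :=
  let q := a / b
  let r := a % b
  if 2 * r > b ∨ (2 * r = b ∧ q % 2 = 1) then q + 1 else q

-- Smallest s with c * 2^s ≥ t (c > 0): the binary exponent search of the float emulation.
def pvFindS (c t s : Nat) : Nat :=
  if h : c ≠ 0 ∧ c * 2 ^ s < t then pvFindS c t (s + 1) else s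
termination_by t - c * 2 ^ s
decreasing_by
  exact Nat.sub_lt_sub_left h.2
    (mul_lt_mul_of_pos_left (Nat.pow_lt_pow_succ one_lt_two) (Nat.pos_of_ne_zero h.1))

def pvFmtPct (c n : Int) : String :=
  let cN := c.toNat
  let nN := n.toNat
  if cN = 0 then "0.00"
  else
    let s := pvFindS cN (2 ^ 52 * nN) 0
    let M := pvRHE (cN * 2 ^ s) nN          -- significand of the double nearest c/n
    let r := pvRHE (100 * M) (2 ^ s)        -- that double rounded to 2 decimals, ×100
    PySem.Int.toStr (r / 100) ++ "." ++
      String.ofList [Char.ofNat (48 + r % 100 / 10), Char.ofNat (48 + r % 100 % 10)]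

def list_occurrence_counter (lst : List Int) : String :=
  let counter := PySem.Dict.counter lst
  let keys := PySem.List.sorted counter.keys (fun k => k)
  let message := keys.foldl (fun msg k =>
    let count := counter.getD k 0
    msg ++ [PySem.Int.toStr k ++ ": " ++ pvFmtPct count (lst.length : Int)]) []
  "{" ++ PySem.Str.join ", " message ++ "}"

-- ===== PORT B =====
-- B-side emulation of the same  f"{c/n:.2f}"  construct (both Pythons spell it with an
-- f-string), computed by a different route with the same exact semantics on 0 ≤ c ≤ n,
-- n > 0: a half-up quotient with an even-tie correction, a doubling search for the
-- binary exponent, and digit assembly from a zero-padded decimal string.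

-- Round a/b (b > 0) to the nearest integer, ties to even: half-up, corrected at a tie.
def pvAltRound (a b : Nat) : Nat :=
  let q := (2 * a + b) / (b + b)
  if 2 * (a % b) = b ∧ q % 2 = 1 then q - 1 else q

-- How many doublings take c up to at least t.
def pvAltScale (c t : Nat) : Nat :=
  if h : 0 < c ∧ c < t then pvAltScale (c + c) t + 1 else 0
termination_by t - c
decreasing_by
  exact Nat.sub_lt_sub_left h.2 (Nat.lt_add_of_pos_left h.1)

def pvAltFmt (c n : Int) : String :=
  if c.toNat = 0 then "0.00"
  else
    let e := pvAltScale c.toNat (4503599627370496 * n.toNat)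
    let h := pvAltRound (100 * pvAltRound (c.toNat <<< e) n.toNat) (1 <<< e)
    let d := (PySem.Int.toStr (1000 + (h : Int))).toList
    String.ofList [d.getD 1 '0', '.', d.getD 2 '0', d.getD 3 '0']

-- the inner while loop (j scans past the run of elements equal to s[i]) as takeWhile/dropWhile
def pvGroupParts (n : Int) : List Int → List String
  | [] => []
  | x :: xs =>
    let run := xs.takeWhile (fun y => y == x)
    let rest := xs.dropWhile (fun y => y == x)
    (PySem.Int.toStr x ++ ": " ++ pvAltFmt ((1 + run.length : Nat) : Int) n)
      :: pvGroupParts n rest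
termination_by l => l.length
decreasing_by
  exact Nat.lt_succ_of_le (List.length_dropWhile_le _ _)

def list_occurrence_counter_alt (lst : List Int) : String :=
  let n := lst.length
  let s := PySem.List.sorted lst (fun x => x)
  let parts := pvGroupParts (n : Int) s
  "{" ++ PySem.Str.join ", " parts ++ "}"

-- ===== PRECONDITION & SPEC =====
def Spec_list_occurrence_counter (lst : List Int) (out : String) : Prop := out = list_occurrence_counter_alt lst
instance (lst : List Int) (out : String) : Decidable (Spec_list_occurrence_counter lst out) := by unfold Spec_list_occurrence_counter; infer_instance

-- ===== CLAIM (what is proved, stated in full; the proofs are below) =====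
def Claim_equal_list_occurrence_counter : Prop := ∀ (lst : List Int), Dom_list_occurrence_counter lst → Spec_list_occurrence_counter lst (list_occurrence_counter lst)

-- ===== LEMMAS AND PROOFS =====

-- The two rounders agree (b > 0).
theorem pvAltRound_eq (a b : Nat) (hb : 0 < b) : pvAltRound a b = pvRHE a b := by
  simp only [pvAltRound, pvRHE]
  have hr : a % b < b := Nat.mod_lt a hb
  have hq : (2 * a + b) / (b + b) = (2 * (a % b) + b) / (b + b) + a / b := by
    have hdm := Nat.div_add_mod a b
    have h1 : 2 * a + b = 2 * (a % b) + b + a / b * (b + b) := by nlinarith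
    rw [h1, Nat.add_mul_div_right _ _ (by omega : 0 < b + b)]
  by_cases hle : b ≤ 2 * (a % b)
  · have hv : (2 * (a % b) + b) / (b + b) = 1 := Nat.div_eq_of_lt_le (by omega) (by omega)
    rw [hq, hv]
    split_ifs <;> try omega
    exact Nat.add_sub_cancel_left 1 (a / b)
  · have hv : (2 * (a % b) + b) / (b + b) = 0 := Nat.div_eq_of_lt (by omega)
    rw [hq, hv]
    split_ifs <;> omega

-- The two exponent searches agree (c > 0).
theorem pvFindS_eq (c t s : Nat) (hc : c ≠ 0) :
    pvFindS c t s = s + pvAltScale (c * 2 ^ s) t := by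
  have key : ∀ m s, t - c * 2 ^ s ≤ m → pvFindS c t s = s + pvAltScale (c * 2 ^ s) t := by
    intro m
    induction m with
    | zero =>
      intro s hz
      have hpos : 0 < c * 2 ^ s := Nat.mul_pos (Nat.pos_of_ne_zero hc) (Nat.two_pow_pos s)
      rw [pvFindS, dif_neg (fun hh => by omega), pvAltScale, dif_neg (by omega)]
      omega
    | succ m ih =>
      intro s hm
      have hpos : 0 < c * 2 ^ s := Nat.mul_pos (Nat.pos_of_ne_zero hc) (Nat.two_pow_pos s)
      have hdbl : c * 2 ^ (s + 1) = c * 2 ^ s + c * 2 ^ s := by ring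
      by_cases hlt : c * 2 ^ s < t
      · have hstep : pvAltScale (c * 2 ^ s) t = pvAltScale (c * 2 ^ (s + 1)) t + 1 := by
          rw [pvAltScale, dif_pos ⟨hpos, hlt⟩, ← hdbl]
        rw [pvFindS, dif_pos ⟨hc, hlt⟩, ih (s + 1) (by omega), hstep]
        omega
      · rw [pvFindS, dif_neg (fun hh => hlt hh.2), pvAltScale, dif_neg (by omega)]
        omega
  exact key (t - c * 2 ^ s) s le_rfl

-- If a ≤ b * k then round-to-nearest of a/b is at most k.
theorem pvRHE_le (a b k : Nat) (hb : 0 < b) (h : a ≤ b * k) : pvRHE a b ≤ k := by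
  simp only [pvRHE]
  have hdm := Nat.div_add_mod a b
  have hr : a % b < b := Nat.mod_lt a hb
  have hqk : a / b ≤ k := by
    have := Nat.div_le_div_right (c := b) h
    rwa [Nat.mul_div_cancel_left _ hb] at this
  by_cases hqe : a / b = k
  · have hbk : b * (a / b) = b * k := by rw [hqe]
    have hrz : a % b = 0 := by omega
    rw [if_neg (by omega)]
    omega
  · split_ifs <;> omega

-- Digit assembly: the padded-decimal route equals A's explicit digit characters, r ≤ 100.
theorem pvDigits (r : Fin 101) :
    String.ofList [(PySem.Int.toStr (1000 + (r.1 : Int))).toList.getD 1 '0', '.',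
      (PySem.Int.toStr (1000 + (r.1 : Int))).toList.getD 2 '0',
      (PySem.Int.toStr (1000 + (r.1 : Int))).toList.getD 3 '0'] =
    PySem.Int.toStr ((r.1 : Int) / 100) ++ "." ++
      String.ofList [Char.ofNat (48 + r.1 % 100 / 10), Char.ofNat (48 + r.1 % 100 % 10)] := by
  revert r
  decide

-- The two format emulations agree on 0 ≤ c ≤ n.
theorem pvAltFmt_eq (cN nN : Nat) (h : cN ≤ nN) :
    pvAltFmt (cN : Int) (nN : Int) = pvFmtPct (cN : Int) (nN : Int) := by
  simp only [pvAltFmt, pvFmtPct, Int.toNat_natCast]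
  by_cases hc : cN = 0
  · simp [hc]
  · have hn : 0 < nN := lt_of_lt_of_le (Nat.pos_of_ne_zero hc) h
    rw [if_neg hc, if_neg hc]
    have hs : pvAltScale cN (4503599627370496 * nN) = pvFindS cN (2 ^ 52 * nN) 0 := by
      rw [pvFindS_eq _ _ _ hc]
      norm_num
    rw [hs]
    set s := pvFindS cN (2 ^ 52 * nN) 0 with hsdef
    have hsh1 : cN <<< s = cN * 2 ^ s := Nat.shiftLeft_eq _ _
    have hsh2 : (1 : Nat) <<< s = 2 ^ s := by rw [Nat.shiftLeft_eq, Nat.one_mul]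
    rw [hsh1, hsh2, pvAltRound_eq _ _ hn, pvAltRound_eq _ _ (Nat.two_pow_pos s)]
    have hMle : pvRHE (cN * 2 ^ s) nN ≤ 2 ^ s :=
      pvRHE_le _ _ _ hn (by nlinarith [Nat.mul_le_mul_right (2 ^ s) h])
    have hrle : pvRHE (100 * pvRHE (cN * 2 ^ s) nN) (2 ^ s) ≤ 100 :=
      pvRHE_le _ _ _ (Nat.two_pow_pos s) (by nlinarith [hMle])
    exact pvDigits ⟨pvRHE (100 * pvRHE (cN * 2 ^ s) nN) (2 ^ s), by omega⟩

-- first element of each run of a list (the distinct elements, in order, for a sorted list)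
def pvHeads : List Int → List Int
  | [] => []
  | x :: xs => x :: pvHeads (xs.dropWhile (fun y => y == x))
termination_by l => l.length
decreasing_by
  exact Nat.lt_succ_of_le (List.length_dropWhile_le _ _)

theorem pvFoldlAppend {α β : Type} (f : α → β) (l : List α) (acc : List β) :
    l.foldl (fun msg k => msg ++ [f k]) acc = acc ++ l.map f := by
  induction l generalizing acc with
  | nil => simp
  | cons x xs ih => simp [List.foldl, ih]

-- every element past the dropped run is strictly greater than the head (sorted list)
theorem pvRestGt (x : Int) (xs : List Int) (hp : (x :: xs).Pairwise (· ≤ ·)) :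
    ∀ y ∈ xs.dropWhile (fun y => y == x), x < y := by
  intro y hy
  have hsub : List.Sublist (xs.dropWhile (fun y => y == x)) xs := List.dropWhile_sublist _
  have hle : x ≤ y := (List.pairwise_cons.mp hp).1 y (hsub.subset hy)
  rcases eq_or_lt_of_le hle with heq | hlt
  · exfalso
    have hrest : (xs.dropWhile (fun y => y == x)).Pairwise (· ≤ ·) :=
      (List.pairwise_cons.mp hp).2.sublist hsub
    cases hd : xs.dropWhile (fun y => y == x) with
    | nil => rw [hd] at hy; exact absurd hy (List.not_mem_nil)
    | cons z t =>
      have hz : ¬ (z == x) = true := by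
        have := List.head?_dropWhile_not (fun y => y == x) xs
        rw [hd] at this; simpa using this
      rw [hd] at hy hrest
      rcases List.mem_cons.mp hy with rfl | hyt
      · exact hz (by simp [← heq])
      · have hzy : z ≤ y := (List.pairwise_cons.mp hrest).1 y hyt
        have hzx : x ≤ z := (List.pairwise_cons.mp hp).1 z (hsub.subset (hd ▸ List.mem_cons_self))
        have : z = x := le_antisymm (heq ▸ hzy) hzx
        exact hz (by simp [this])
  · exact hlt

theorem pvTakeWhileCount (x : Int) (xs : List Int) :
    (xs.takeWhile (fun y => y == x)).count x = (xs.takeWhile (fun y => y == x)).length := by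
  apply List.count_eq_length.mpr
  intro y hy
  have h := List.mem_takeWhile_imp (p := fun y => y == x) hy
  exact (by simpa using h : y = x).symm ▸ rfl

theorem pvHeadsMem (S : List Int) : ∀ a, a ∈ pvHeads S ↔ a ∈ S := by
  induction S using pvHeads.induct with
  | case1 => intro a; rw [pvHeads]
  | case2 x xs ih =>
    intro a
    rw [pvHeads]
    have hsplit : xs = xs.takeWhile (fun y => y == x) ++ xs.dropWhile (fun y => y == x) :=
      (List.takeWhile_append_dropWhile).symm
    have hsub : List.Sublist (xs.dropWhile (fun y => y == x)) xs := List.dropWhile_sublist _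
    constructor
    · intro h
      rcases List.mem_cons.mp h with rfl | h
      · exact List.mem_cons_self
      · exact List.mem_cons.mpr (Or.inr (hsub.subset ((ih a).mp h)))
    · intro h
      rcases List.mem_cons.mp h with rfl | h
      · exact List.mem_cons_self
      · rw [hsplit] at h
        rcases List.mem_append.mp h with h | h
        · have hax := List.mem_takeWhile_imp (p := fun y => y == x) h
          have : a = x := by simpa using hax
          simp [this]
        · exact List.mem_cons.mpr (Or.inr ((ih a).mpr h))

theorem pvHeadsPairwise (S : List Int) (hp : S.Pairwise (· ≤ ·)) :
    (pvHeads S).Pairwise (· < ·) := by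
  induction S using pvHeads.induct with
  | case1 => rw [pvHeads]; exact List.Pairwise.nil
  | case2 x xs ih =>
    rw [pvHeads]
    have hrest : (xs.dropWhile (fun y => y == x)).Pairwise (· ≤ ·) :=
      ((List.pairwise_cons.mp hp).2).sublist (List.dropWhile_sublist _)
    refine List.pairwise_cons.mpr ⟨?_, ih hrest⟩
    intro y hy
    exact pvRestGt x xs hp y ((pvHeadsMem _ y).mp hy)

theorem pvCountRun (x : Int) (xs : List Int) (hp : (x :: xs).Pairwise (· ≤ ·)) :
    (x :: xs).count x = 1 + (xs.takeWhile (fun y => y == x)).length := by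
  have hsplit : xs = xs.takeWhile (fun y => y == x) ++ xs.dropWhile (fun y => y == x) :=
    (List.takeWhile_append_dropWhile).symm
  have hrest0 : (xs.dropWhile (fun y => y == x)).count x = 0 := by
    apply List.count_eq_zero.mpr
    intro hmem
    exact absurd rfl (ne_of_gt (pvRestGt x xs hp x hmem))
  rw [List.count_cons_self]
  conv_lhs => rw [hsplit]
  rw [List.count_append, hrest0, pvTakeWhileCount]
  omega

theorem pvCountPreserved (x : Int) (xs : List Int) (hp : (x :: xs).Pairwise (· ≤ ·))
    (k : Int) (hk : k ∈ xs.dropWhile (fun y => y == x)) :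
    (x :: xs).count k = (xs.dropWhile (fun y => y == x)).count k := by
  have hxk : x < k := pvRestGt x xs hp k hk
  have hsplit : xs = xs.takeWhile (fun y => y == x) ++ xs.dropWhile (fun y => y == x) :=
    (List.takeWhile_append_dropWhile).symm
  have hrun0 : (xs.takeWhile (fun y => y == x)).count k = 0 := by
    apply List.count_eq_zero.mpr
    intro hmem
    have hkx := List.mem_takeWhile_imp (p := fun y => y == x) hmem
    have : k = x := by simpa using hkx
    exact absurd this (ne_of_gt hxk)
  rw [List.count_cons_of_ne (Ne.symm (ne_of_gt hxk))]
  conv_lhs => rw [hsplit]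
  rw [List.count_append, hrun0]
  omega

-- the run-length scan over a sorted list = map over its distinct heads with full counts
theorem pvGroupPartsEq (n : Int) (S : List Int) (hp : S.Pairwise (· ≤ ·)) :
    pvGroupParts n S =
      (pvHeads S).map (fun k => PySem.Int.toStr k ++ ": " ++ pvAltFmt ((S.count k : Nat) : Int) n) := by
  induction S using pvHeads.induct with
  | case1 => rw [pvGroupParts, pvHeads]; rfl
  | case2 x xs ih =>
    rw [pvGroupParts, pvHeads]
    have hrest : (xs.dropWhile (fun y => y == x)).Pairwise (· ≤ ·) :=
      ((List.pairwise_cons.mp hp).2).sublist (List.dropWhile_sublist _)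
    rw [List.map_cons, ih hrest]
    congr 1
    · rw [pvCountRun x xs hp, Nat.add_comm]
    · apply List.map_congr_left
      intro k hk
      have hkmem := (pvHeadsMem _ k).mp hk
      rw [pvCountPreserved x xs hp k hkmem]

theorem pvHeadsSortedKeys (lst : List Int) :
    PySem.List.sorted (PySem.Set.ofList lst) (fun k => k) =
      pvHeads (PySem.List.sorted lst (fun x => x)) := by
  apply PySem.List.sorted_eq_of_perm_of_pairwise_lt
  · apply (List.perm_ext_iff_of_nodup ?_ (PySem.Set.nodup_ofList lst)).mpr
    · intro a
      rw [pvHeadsMem, PySem.List.mem_sorted, PySem.Set.mem_ofList]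
    · exact (pvHeadsPairwise _ (by
        simpa using PySem.List.sorted_pairwise lst (fun x => x))).nodup
  · exact pvHeadsPairwise _ (by simpa using PySem.List.sorted_pairwise lst (fun x => x))

-- ===== VERDICT (by name: the statement is the Claim_ definition above) =====
theorem list_occurrence_counter_spec : Claim_equal_list_occurrence_counter := by
  intro lst _
  unfold Spec_list_occurrence_counter list_occurrence_counter list_occurrence_counter_alt
  simp only
  congr 1
  congr 1
  congr 1
  rw [pvFoldlAppend, List.nil_append, PySem.Dict.keys_counter, pvHeadsSortedKeys,
    pvGroupPartsEq _ _ (by simpa using PySem.List.sorted_pairwise lst (fun x => x))]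
  apply List.map_congr_left
  intro k hk
  rw [PySem.Dict.getD_counter]
  have hcnt : (PySem.List.sorted lst (fun x => x)).count k = lst.count k :=
    List.Perm.count_eq (PySem.List.sorted_perm lst (fun x => x) false) k
  rw [hcnt, pvAltFmt_eq _ _ (List.count_le_length)]
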